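-- pv_equiv track=rewrite | github.com/cr625/proethica | app/services/interactive_scenario_service.py | _event_state_from_anchors
-- ===== SOURCE A (Python) =====
-- from typing import Dict, List, Optional, Any
--
-- def _event_state_from_anchors(
--     event_index: int, dp_anchors: Dict[int, int], current_decision_index: int
-- ) -> str:
--     """Determine whether a timeline event is past/current/future relative to progress."""
--     # Find the nearest decision anchor at or after this event
--     nearest_dp_idx = None
--     for anchor_pos in sorted(dp_anchors.keys()):
--         if anchor_pos >= event_index:
--             nearest_dp_idx = dp_anchors[anchor_pos]
--             break
--
--     if nearest_dp_idx is None: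
--         # Event is after all decision anchors
--         return 'future'
--
--     if nearest_dp_idx < current_decision_index:
--         return 'past'
--     elif nearest_dp_idx == current_decision_index:
--         return 'current'
--     return 'future'
-- ===== SOURCE B (Python) =====
-- def _event_state_from_anchors(
--     event_index: int, dp_anchors, current_decision_index: int
-- ) -> str:
--     """Determine whether a timeline event is past/current/future relative to progress."""
--     # Single pass: pick the anchor with the smallest position at or after the event.
--     best = None
--     for pos, dp_idx in dp_anchors.items():
--         if pos >= event_index and (best is None or pos < best[0]):
--             best = (pos, dp_idx)
--
--     if best is None:
--         return 'future'
--
--     if best[1] < current_decision_index: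
--         return 'past'
--     elif best[1] == current_decision_index:
--         return 'current'
--     return 'future'
-- ===== Notes on version B (the rewrite author's own statement) =====
-- stated objective: faster
-- what changed: Replaces sort-then-scan-then-dict-lookup with a single min-selecting pass over the items that tracks the best (position, index) pair.
import Mathlib
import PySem

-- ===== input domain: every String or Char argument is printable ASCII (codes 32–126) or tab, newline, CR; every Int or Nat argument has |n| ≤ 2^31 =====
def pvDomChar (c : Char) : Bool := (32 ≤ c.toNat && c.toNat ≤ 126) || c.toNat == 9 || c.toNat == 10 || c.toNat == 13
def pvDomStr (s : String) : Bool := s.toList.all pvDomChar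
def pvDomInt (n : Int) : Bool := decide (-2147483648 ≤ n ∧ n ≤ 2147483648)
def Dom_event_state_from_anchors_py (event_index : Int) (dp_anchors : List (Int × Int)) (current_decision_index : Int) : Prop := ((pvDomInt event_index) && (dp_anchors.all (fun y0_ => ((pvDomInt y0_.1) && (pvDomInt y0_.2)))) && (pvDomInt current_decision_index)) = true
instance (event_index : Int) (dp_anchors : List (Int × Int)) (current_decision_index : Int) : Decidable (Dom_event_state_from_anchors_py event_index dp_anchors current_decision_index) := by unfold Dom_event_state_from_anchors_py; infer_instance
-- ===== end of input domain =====

-- B drops A's sort of the anchor keys: one O(n) min-selecting pass over the items instead of O(n log n) sort-then-scan; same return value (objective: faster).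

-- ===== PORT A =====
-- the 'for anchor_pos in sorted(dp_anchors.keys()): if anchor_pos >= event_index: nearest = dp_anchors[anchor_pos]; break' loop
def pvALoop (event_index : Int) (dp_anchors : List (Int × Int)) : List Int → Option Int
  | [] => none
  | k :: ks =>
      if event_index ≤ k then dp_anchors.lookup k   -- dp_anchors[anchor_pos], then break
      else pvALoop event_index dp_anchors ks

def event_state_from_anchors_py (event_index : Int) (dp_anchors : List (Int × Int)) (current_decision_index : Int) : String :=
  let nearest_dp_idx :=
    pvALoop event_index dp_anchors
      (PySem.List.sorted (dp_anchors.map Prod.fst) (fun x => x) false)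
  match nearest_dp_idx with
  | none => "future"
  | some v =>
      if v < current_decision_index then "past"
      else if v = current_decision_index then "current"
      else "future"

-- ===== PORT B =====
def event_state_from_anchors_py_alt (event_index : Int) (dp_anchors : List (Int × Int)) (current_decision_index : Int) : String :=
  let best := dp_anchors.foldl
    (fun best kv =>
      if decide (event_index ≤ kv.1) && (match best with | none => true | some b => decide (kv.1 < b.1)) then some kv
      else best)
    (none : Option (Int × Int))
  match best with
  | none => "future"
  | some b =>
      if b.2 < current_decision_index then "past"
      else if b.2 = current_decision_index then "current"
      else "future"

-- ===== PRECONDITION & SPEC =====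
def Spec_event_state_from_anchors_py (event_index : Int) (dp_anchors : List (Int × Int)) (current_decision_index : Int) (out : String) : Prop := out = event_state_from_anchors_py_alt event_index dp_anchors current_decision_index
instance (event_index : Int) (dp_anchors : List (Int × Int)) (current_decision_index : Int) (out : String) : Decidable (Spec_event_state_from_anchors_py event_index dp_anchors current_decision_index out) := by unfold Spec_event_state_from_anchors_py; infer_instance

-- ===== CLAIM (what is proved, stated in full; the proofs are below) =====
def Claim_equal_event_state_from_anchors_py : Prop := ∀ (event_index : Int) (dp_anchors : List (Int × Int)) (current_decision_index : Int), Dom_event_state_from_anchors_py event_index dp_anchors current_decision_index → Spec_event_state_from_anchors_py event_index dp_anchors current_decision_index (event_state_from_anchors_py event_index dp_anchors current_decision_index)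

-- ===== LEMMAS AND PROOFS =====

-- B's fold step, named for the proofs
def pvStep (event_index : Int) (best : Option (Int × Int)) (kv : Int × Int) : Option (Int × Int) :=
  if decide (event_index ≤ kv.1) && (match best with | none => true | some b => decide (kv.1 < b.1)) then some kv
  else best

-- structural recursion computing the same selection as B's fold
def pvMinPair (event_index : Int) : List (Int × Int) → Option (Int × Int)
  | [] => none
  | p :: rest =>
      if event_index ≤ p.1 then
        match pvMinPair event_index rest with
        | none => some p
        | some q => if q.1 < p.1 then some q else some p
      else pvMinPair event_index rest

def pvMerge : Option (Int × Int) → Option (Int × Int) → Option (Int × Int)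
  | none, r => r
  | some b, none => some b
  | some b, some q => if q.1 < b.1 then some q else some b

theorem pvStep_eq_merge (ei : Int) (acc : Option (Int × Int)) (p : Int × Int) :
    pvStep ei acc p = if ei ≤ p.1 then pvMerge acc (some p) else acc := by
  cases acc with
  | none => by_cases h1 : ei ≤ p.1 <;> simp [pvStep, pvMerge, h1]
  | some b =>
      by_cases h1 : ei ≤ p.1 <;> by_cases h2 : p.1 < b.1 <;>
        simp [pvStep, pvMerge, h1, h2]

theorem pvMerge_assoc (a b c : Option (Int × Int)) :
    pvMerge (pvMerge a b) c = pvMerge a (pvMerge b c) := by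
  cases a <;> cases b <;> cases c <;> dsimp only [pvMerge] <;> split_ifs <;>
    dsimp only [pvMerge] <;> split_ifs <;> first | rfl | omega

theorem pvFold_eq_minPair (ei : Int) (d : List (Int × Int)) (acc : Option (Int × Int)) :
    d.foldl (pvStep ei) acc = pvMerge acc (pvMinPair ei d) := by
  induction d generalizing acc with
  | nil => cases acc <;> simp [pvMerge, pvMinPair]
  | cons p rest ih =>
      simp only [List.foldl_cons, pvMinPair, ih, pvStep_eq_merge]
      by_cases h : ei ≤ p.1
      · rw [if_pos h, if_pos h, pvMerge_assoc]
        congr 1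
        cases hm : pvMinPair ei rest <;> simp only [pvMerge]
      · rw [if_neg h, if_neg h]

theorem pvMinPair_none (ei : Int) (d : List (Int × Int)) :
    pvMinPair ei d = none ↔ ∀ p ∈ d, ¬ ei ≤ p.1 := by
  induction d with
  | nil => simp [pvMinPair]
  | cons p rest ih =>
      simp only [pvMinPair, List.mem_cons]
      by_cases h : ei ≤ p.1
      · rw [if_pos h]
        constructor
        · intro hc
          exfalso
          cases hm : pvMinPair ei rest <;> rw [hm] at hc <;> dsimp only at hc
          · simp at hc
          · split_ifs at hc
        · intro hall; exact absurd h (hall p (Or.inl rfl))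
      · rw [if_neg h, ih]
        constructor
        · intro hall q hq
          rcases hq with rfl | hq
          · exact h
          · exact hall q hq
        · intro hall q hq; exact hall q (Or.inr hq)

theorem pvMinPair_some (ei : Int) (d : List (Int × Int)) :
    ∀ b, pvMinPair ei d = some b →
      ei ≤ b.1 ∧ (∀ p ∈ d, ei ≤ p.1 → b.1 ≤ p.1) ∧ d.lookup b.1 = some b.2 := by
  induction d with
  | nil => intro b h; simp [pvMinPair] at h
  | cons p rest ih =>
      intro b h
      simp only [pvMinPair] at h
      by_cases hq : ei ≤ p.1
      · rw [if_pos hq] at h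
        cases hm : pvMinPair ei rest with
        | none =>
            rw [hm] at h; injection h with h; subst h
            refine ⟨hq, ?_, ?_⟩
            · intro q hq2 hq3
              rcases List.mem_cons.mp hq2 with rfl | hmem
              · exact le_refl _
              · exact absurd hq3 ((pvMinPair_none ei rest).mp hm q hmem)
            · simp [List.lookup]
        | some c =>
            rw [hm] at h
            dsimp only at h
            obtain ⟨hc1, hc2, hc3⟩ := ih c hm
            by_cases hlt : c.1 < p.1
            · rw [if_pos hlt] at h; injection h with h; subst h
              refine ⟨hc1, ?_, ?_⟩
              · intro q hq2 hq3
                rcases List.mem_cons.mp hq2 with rfl | hmem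
                · omega
                · exact hc2 q hmem hq3
              · simp only [List.lookup]
                rw [show (c.1 == p.1) = false from beq_eq_false_iff_ne.mpr (by omega)]
                exact hc3
            · rw [if_neg hlt] at h; injection h with h; subst h
              refine ⟨hq, ?_, ?_⟩
              · intro q hq2 hq3
                rcases List.mem_cons.mp hq2 with rfl | hmem
                · exact le_refl _
                · exact le_trans (by omega) (hc2 q hmem hq3)
              · simp [List.lookup]
      · rw [if_neg hq] at h
        obtain ⟨hc1, hc2, hc3⟩ := ih b h
        refine ⟨hc1, ?_, ?_⟩
        · intro q hq2 hq3
          rcases List.mem_cons.mp hq2 with rfl | hmem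
          · exact absurd hq3 hq
          · exact hc2 q hmem hq3
        · simp only [List.lookup]
          rw [show (b.1 == p.1) = false from beq_eq_false_iff_ne.mpr (by omega)]
          exact hc3

-- key present whenever lookup returns a value
theorem pvLookup_mem_keys (d : List (Int × Int)) (k v : Int)
    (h : d.lookup k = some v) : k ∈ d.map Prod.fst := by
  induction d with
  | nil => simp [List.lookup] at h
  | cons p rest ih =>
      simp only [List.lookup] at h
      cases he : (k == p.1) with
      | true =>
          simp only [List.map_cons, List.mem_cons]
          exact Or.inl (beq_iff_eq.mp he)
      | false =>
          rw [he] at h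
          exact List.mem_cons_of_mem _ (ih h)

-- A's scan is find?-then-lookup
theorem pvALoop_eq_find (ei : Int) (d : List (Int × Int)) (ks : List Int) :
    pvALoop ei d ks = match ks.find? (fun k => decide (ei ≤ k)) with
      | none => none
      | some k => d.lookup k := by
  induction ks with
  | nil => simp [pvALoop]
  | cons k ks ih =>
      by_cases h : ei ≤ k
      · simp [pvALoop, h, List.find?_cons_of_pos]
      · simp [pvALoop, h, List.find?_cons_of_neg, ih]

theorem pvFind_sorted_min {ks : List Int} (hs : ks.Pairwise (· ≤ ·)) (ei k0 : Int)
    (h : ks.find? (fun k => decide (ei ≤ k)) = some k0) :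
    ∀ k ∈ ks, ei ≤ k → k0 ≤ k := by
  induction ks with
  | nil => simp at h
  | cons a ks ih =>
      by_cases ha : ei ≤ a
      · rw [List.find?_cons_of_pos (by simpa using ha)] at h
        injection h with h; subst h
        intro k hk _
        rcases List.mem_cons.mp hk with rfl | hmem
        · exact le_refl _
        · exact (List.pairwise_cons.mp hs).1 k hmem
      · rw [List.find?_cons_of_neg (by simpa using ha)] at h
        intro k hk hek
        rcases List.mem_cons.mp hk with rfl | hmem
        · exact absurd hek ha
        · exact ih (List.pairwise_cons.mp hs).2 h k hmem hek

-- A's nearest index equals the second component of B's best pair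
theorem pvNearest_eq (ei : Int) (d : List (Int × Int)) :
    pvALoop ei d (PySem.List.sorted (d.map Prod.fst) (fun x => x) false)
      = Option.map Prod.snd (pvMinPair ei d) := by
  set ks := PySem.List.sorted (d.map Prod.fst) (fun x => x) false with hks
  have hperm : ks.Perm (d.map Prod.fst) := PySem.List.sorted_perm _ _ _
  have hsorted : ks.Pairwise (· ≤ ·) := by
    simpa using PySem.List.sorted_pairwise (d.map Prod.fst) (fun x => x)
  rw [pvALoop_eq_find]
  cases hf : ks.find? (fun k => decide (ei ≤ k)) with
  | none =>
      have hall : ∀ k ∈ ks, ¬ ei ≤ k := by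
        intro k hk
        have := List.find?_eq_none.mp hf k hk
        simpa using this
      have : pvMinPair ei d = none := by
        rw [pvMinPair_none]
        intro p hp
        exact hall p.1 (hperm.mem_iff.mpr (List.mem_map_of_mem hp))
      simp [this]
  | some k0 =>
      have hk0mem : k0 ∈ ks := List.mem_of_find?_eq_some hf
      have hk0q : ei ≤ k0 := by simpa using List.find?_some hf
      cases hm : pvMinPair ei d with
      | none =>
          exfalso
          have hall := (pvMinPair_none ei d).mp hm
          obtain ⟨p, hp, rfl⟩ := List.mem_map.mp (hperm.mem_iff.mp hk0mem)
          exact hall p hp hk0q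
      | some b =>
          obtain ⟨hb1, hb2, hb3⟩ := pvMinPair_some ei d b hm
          have hbmem : b.1 ∈ d.map Prod.fst := pvLookup_mem_keys d b.1 b.2 hb3
          obtain ⟨p, hp, hpk⟩ := List.mem_map.mp (hperm.mem_iff.mp hk0mem)
          have h1 : b.1 ≤ k0 := by
            rw [← hpk]; exact hb2 p hp (by rw [hpk]; exact hk0q)
          have h2 : k0 ≤ b.1 :=
            pvFind_sorted_min hsorted ei k0 hf b.1 (hperm.mem_iff.mpr hbmem) hb1
          have hkb : k0 = b.1 := le_antisymm h2 h1
          subst hkb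
          simp [hb3]

-- ===== VERDICT (by name: the statement is the Claim_ definition above) =====
theorem event_state_from_anchors_py_spec : Claim_equal_event_state_from_anchors_py := by
  intro ei d cdi _
  show event_state_from_anchors_py ei d cdi = event_state_from_anchors_py_alt ei d cdi
  unfold event_state_from_anchors_py event_state_from_anchors_py_alt
  have hstep : (fun (best : Option (Int × Int)) (kv : Int × Int) =>
      if decide (ei ≤ kv.1) && (match best with | none => true | some b => decide (kv.1 < b.1)) then some kv
      else best) = pvStep ei := rfl
  rw [hstep]
  have hfold : d.foldl (pvStep ei) none = pvMinPair ei d := by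
    rw [pvFold_eq_minPair]; rfl
  rw [hfold, pvNearest_eq]
  cases pvMinPair ei d <;> simp
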